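-- pv_equiv track=rewrite | github.com/tmxkqotnl/study_this_is_coding_test_to_get_a_job | funda/binary_search/example_3.py | find_minimum_value
-- ===== SOURCE A (Python) =====
-- from typing import Optional
--
-- def get_total_len(lst: list[int], val: int) -> int:
--     return sum(map(lambda x: x - val if x > val else 0, lst))
--
-- def find_minimum_value(
--     lst: list[int], min_v: int, left: int, right: int
-- ) -> Optional[int]:
--     if left >= right:
--         return left
--
--     mid = (left + right) // 2
--     cur_total_len = get_total_len(lst, mid)
--
--     if cur_total_len == min_v:
--         return mid
--     elif cur_total_len > min_v:
--         return find_minimum_value(lst, min_v, mid + 1, right)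
--     else:
--         return find_minimum_value(lst, min_v, left, mid - 1)
-- ===== SOURCE B (Python) =====
-- def _bisect_right(s, val):
--     lo, hi = 0, len(s)
--     while lo < hi:
--         mid = (lo + hi) // 2
--         if s[mid] <= val:
--             lo = mid + 1
--         else:
--             hi = mid
--     return lo
--
--
-- def find_minimum_value(lst, min_v, left, right):
--     s = sorted(lst)
--     n = len(s)
--     # suffix sums: suf[i] == sum(s[i:])
--     acc = 0
--     suf = [0]
--     for x in reversed(s):
--         acc += x
--         suf.append(acc)
--     suf.reverse()
--     while left < right:
--         mid = (left + right) // 2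
--         i = _bisect_right(s, mid)
--         cur_total_len = suf[i] - (n - i) * mid
--         if cur_total_len == min_v:
--             return mid
--         elif cur_total_len > min_v:
--             left = mid + 1
--         else:
--             right = mid - 1
--     return left
-- ===== Notes on version B (the rewrite author's own statement) =====
-- stated objective: alternative
-- what changed: A rescans the whole list (O(n)) at every binary-search probe; B sorts the list once, precomputes suffix sums, and answers each probe with a hand-written bisect_right plus O(1) arithmetic (intended as faster, but a timing run did not confirm a consistent >=1.5x speed-up).
import Mathlib
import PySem

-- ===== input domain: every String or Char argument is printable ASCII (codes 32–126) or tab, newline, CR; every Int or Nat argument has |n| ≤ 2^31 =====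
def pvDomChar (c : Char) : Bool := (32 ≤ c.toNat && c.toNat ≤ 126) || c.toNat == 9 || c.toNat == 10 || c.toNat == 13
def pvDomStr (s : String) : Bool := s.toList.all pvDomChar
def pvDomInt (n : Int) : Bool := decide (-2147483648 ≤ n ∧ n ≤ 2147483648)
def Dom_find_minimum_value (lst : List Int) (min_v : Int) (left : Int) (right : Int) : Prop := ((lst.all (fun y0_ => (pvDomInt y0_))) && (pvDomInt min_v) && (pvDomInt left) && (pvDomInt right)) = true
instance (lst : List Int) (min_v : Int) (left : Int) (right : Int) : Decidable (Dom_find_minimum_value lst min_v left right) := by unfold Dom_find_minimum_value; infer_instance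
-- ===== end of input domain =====

-- B replaces A's rescan-the-whole-list probe with sort + suffix sums + a hand-written
-- binary search per probe; objective: alternative algorithm (intended as faster per
-- probe; a timing run did not confirm a consistent speed-up).

-- ===== PORT A =====
def get_total_len (lst : List Int) (val : Int) : Int :=
  (lst.map (fun x => if x > val then x - val else 0)).sum

-- A's recursion, made structural with an explicit counter: `fuel = (right-left).toNat`
-- bounds the depth (each call shrinks right-left by at least 1), so the `fuel = 0`
-- branch is only reached with `left >= right`, where A also returns `left`.
def fmvGo (lst : List Int) (min_v : Int) : Nat → Int → Int → Int
  | 0, left, _ => left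
  | fuel + 1, left, right =>
    if left ≥ right then left
    else
      let mid := PySem.Int.floordiv (left + right) 2
      let cur_total_len := get_total_len lst mid
      if cur_total_len = min_v then mid
      else if cur_total_len > min_v then fmvGo lst min_v fuel (mid + 1) right
      else fmvGo lst min_v fuel left (mid - 1)

def find_minimum_value (lst : List Int) (min_v : Int) (left : Int) (right : Int) : Int :=
  fmvGo lst min_v (right - left).toNat left right

-- ===== PORT B =====
-- _bisect_right from Source B, the same fuel scheme (`fuel = (hi-lo).toNat` bounds the
-- iteration count); s[mid] is always in range on every reachable state
-- (0 ≤ lo ≤ mid < hi ≤ len s), so the `getD 0` default is never consulted.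
def bisectGo (s : List Int) (val : Int) : Nat → Int → Int → Int
  | 0, lo, _ => lo
  | fuel + 1, lo, hi =>
    if lo < hi then
      let mid := PySem.Int.floordiv (lo + hi) 2
      if (PySem.List.pyGet? s mid).getD 0 ≤ val then bisectGo s val fuel (mid + 1) hi
      else bisectGo s val fuel lo mid
    else lo

def pyBisectRight (s : List Int) (val : Int) : Int :=
  bisectGo s val (s.length : Nat) 0 (s.length : Int)

-- the while-loop of Source B (same fuel scheme); suf[i] is in range on every reachable
-- probe (0 ≤ i ≤ len s), so the `getD 0` default is never consulted.
def altLoopGo (s : List Int) (n : Int) (suf : List Int) (min_v : Int) :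
    Nat → Int → Int → Int
  | 0, left, _ => left
  | fuel + 1, left, right =>
    if left < right then
      let mid := PySem.Int.floordiv (left + right) 2
      let i := pyBisectRight s mid
      let cur_total_len := (PySem.List.pyGet? suf i).getD 0 - (n - i) * mid
      if cur_total_len = min_v then mid
      else if cur_total_len > min_v then altLoopGo s n suf min_v fuel (mid + 1) right
      else altLoopGo s n suf min_v fuel left (mid - 1)
    else left

def find_minimum_value_alt (lst : List Int) (min_v : Int) (left : Int) (right : Int) : Int :=
  let s := PySem.List.sorted lst (fun x => x) false
  let n : Int := s.length
  -- acc/suf accumulation over reversed(s), then suf.reverse(), as in Source B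
  let st := s.reverse.foldl (fun (p : Int × List Int) x => (p.1 + x, p.2 ++ [p.1 + x]))
    ((0 : Int), [(0 : Int)])
  let suf := st.2.reverse
  altLoopGo s n suf min_v (right - left).toNat left right

-- ===== PRECONDITION & SPEC =====
def Spec_find_minimum_value (lst : List Int) (min_v : Int) (left : Int) (right : Int) (out : Int) : Prop := out = find_minimum_value_alt lst min_v left right
instance (lst : List Int) (min_v : Int) (left : Int) (right : Int) (out : Int) : Decidable (Spec_find_minimum_value lst min_v left right out) := by unfold Spec_find_minimum_value; infer_instance

-- ===== CLAIM (what is proved, stated in full; the proofs are below) =====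
def Claim_equal_find_minimum_value : Prop := ∀ (lst : List Int) (min_v : Int) (left : Int) (right : Int), Dom_find_minimum_value lst min_v left right → Spec_find_minimum_value lst min_v left right (find_minimum_value lst min_v left right)

-- ===== LEMMAS AND PROOFS =====

-- mathematical description of Source B's suffix-sum array: sufSpec s = [sum s[0:], sum s[1:], …, 0]
def sufSpec : List Int → List Int
  | [] => [0]
  | x :: xs => (x + xs.sum) :: sufSpec xs

theorem suf_build (s : List Int) :
    s.reverse.foldl (fun (p : Int × List Int) x => (p.1 + x, p.2 ++ [p.1 + x]))
      ((0 : Int), [(0 : Int)]) = (s.sum, (sufSpec s).reverse) := by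
  induction s with
  | nil => simp [sufSpec]
  | cons x xs ih =>
      simp only [List.reverse_cons, List.foldl_append, ih, List.foldl_cons, List.foldl_nil,
        List.sum_cons, sufSpec]
      rw [Int.add_comm xs.sum x]

theorem sufSpec_get (s : List Int) (k : Nat) (hk : k ≤ s.length) :
    (sufSpec s)[k]? = some ((s.drop k).sum) := by
  induction s generalizing k with
  | nil =>
      have h0 : k = 0 := by simpa using hk
      subst h0
      simp [sufSpec]
  | cons x xs ih =>
      cases k with
      | zero => simp [sufSpec]
      | succ k => simpa [sufSpec] using ih k (by simpa using hk)

-- the count of elements ≤ val, the boundary index bisect_right computes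
def cLE (s : List Int) (val : Int) : Nat := s.countP (fun x => decide (x ≤ val))

theorem cLE_le_length (s : List Int) (val : Int) : cLE s val ≤ s.length :=
  List.countP_le_length

theorem sorted_index_iff (s : List Int) (val : Int)
    (hs : s.Pairwise (fun a b => a ≤ b)) (j : Nat) (hj : j < s.length) :
    s[j] ≤ val ↔ j < cLE s val := by
  induction s generalizing j with
  | nil => simp at hj
  | cons x xs ih =>
      have hpw := List.pairwise_cons.1 hs
      cases j with
      | zero =>
          simp only [List.getElem_cons_zero, cLE, List.countP_cons]
          by_cases hx : x ≤ val
          · simp [hx]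
          · have h0 : xs.countP (fun y => decide (y ≤ val)) = 0 := by
              rw [List.countP_eq_zero]
              intro y hy
              have := hpw.1 y hy
              simp
              omega
            simp [hx, h0]
      | succ j =>
          have hj' : j < xs.length := by simpa using hj
          have := ih hpw.2 j hj'
          simp only [List.getElem_cons_succ, cLE, List.countP_cons] at *
          by_cases hx : x ≤ val
          · simp [hx] at *
            omega
          · have h0 : xs.countP (fun y => decide (y ≤ val)) = 0 := by
              rw [List.countP_eq_zero]
              intro y hy
              have := hpw.1 y hy
              simp
              omega
            simp [hx, h0] at *
            omega

theorem bisect_eq (s : List Int) (val : Int)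
    (hs : s.Pairwise (fun a b => a ≤ b)) :
    ∀ (k : Nat) (lo hi : Int), (hi - lo).toNat ≤ k → 0 ≤ lo →
      lo ≤ (cLE s val : Int) → (cLE s val : Int) ≤ hi → hi ≤ (s.length : Int) →
      bisectGo s val k lo hi = (cLE s val : Int) := by
  intro k
  induction k with
  | zero =>
      intro lo hi hk h0 hlc hch hhn
      simp only [bisectGo]
      omega
  | succ k ih =>
      intro lo hi hk h0 hlc hch hhn
      simp only [bisectGo]
      by_cases hlh : lo < hi
      · simp only [hlh, if_true]
        have hb := PySem.Int.floordiv_two_mid_bounds (show lo ≤ hi by omega)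
        have hlt : PySem.Int.floordiv (lo + hi) 2 < hi :=
          (PySem.Int.floordiv_lt_iff_lt_mul (by norm_num)).2 (by omega)
        set mid := PySem.Int.floordiv (lo + hi) 2 with hmid
        have hmn : mid.toNat < s.length := by omega
        have hget' : PySem.List.pyGet? s mid = s[mid.toNat]? := by
          have hm : mid = ((mid.toNat : Nat) : Int) := by omega
          rw [hm, PySem.List.pyGet?_natCast]
          simp
          have h2 : (max mid 0).toNat = mid.toNat := by omega
          rw [h2]
        have hget : PySem.List.pyGet? s mid = some s[mid.toNat] := by
          rw [hget', List.getElem?_eq_getElem hmn]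
        rw [hget]
        have hiff := sorted_index_iff s val hs mid.toNat hmn
        by_cases hle : s[mid.toNat] ≤ val
        · have hc : mid < (cLE s val : Int) := by
            have := hiff.1 hle
            omega
          simp only [hle, Option.getD_some, if_true]
          exact ih (mid + 1) hi (by omega) (by omega) (by omega) hch hhn
        · have hc : (cLE s val : Int) ≤ mid := by
            by_contra hcon
            exact hle (hiff.2 (by omega))
          simp only [hle, Option.getD_some, if_false]
          exact ih lo mid (by omega) h0 hlc hc (by omega)
      · simp only [hlh, if_false]
        omega

theorem pyBisectRight_eq (s : List Int) (val : Int)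
    (hs : s.Pairwise (fun a b => a ≤ b)) :
    pyBisectRight s val = (cLE s val : Int) := by
  have hc := cLE_le_length s val
  exact bisect_eq s val hs s.length 0 (s.length : Int) (by omega)
    (le_refl _) (by exact_mod_cast Nat.zero_le _) (by exact_mod_cast hc) (le_refl _)

theorem total_closed (s : List Int) (val : Int)
    (hs : s.Pairwise (fun a b => a ≤ b)) :
    get_total_len s val
      = (s.drop (cLE s val)).sum - ((s.length : Int) - (cLE s val : Int)) * val := by
  induction s with
  | nil => simp [get_total_len, cLE]
  | cons x xs ih =>
      have hpw := List.pairwise_cons.1 hs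
      have ih' := ih hpw.2
      by_cases hx : x ≤ val
      · have hxg : ¬ x > val := by omega
        have hc : cLE (x :: xs) val = cLE xs val + 1 := by
          simp [cLE, hx]
        have hlen : cLE xs val ≤ xs.length := cLE_le_length xs val
        simp only [get_total_len, List.map_cons, List.sum_cons, if_neg hxg] at *
        rw [hc]
        simp only [List.drop_succ_cons, List.length_cons]
        rw [ih']
        push_cast
        ring
      · have hxg : x > val := by omega
        have h0 : cLE xs val = 0 := by
          rw [cLE, List.countP_eq_zero]
          intro y hy
          have := hpw.1 y hy
          simp
          omega
        have hc : cLE (x :: xs) val = 0 := by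
          unfold cLE at h0 ⊢
          rw [List.countP_cons]
          simp [hx, h0]
        unfold get_total_len at ih'
        simp only [get_total_len, List.map_cons, List.sum_cons, if_pos hxg]
        rw [hc, ih', h0]
        simp only [List.drop_zero, List.length_cons, List.sum_cons, Nat.cast_zero]
        push_cast
        ring

theorem get_total_len_perm (lst s : List Int) (h : s.Perm lst) (val : Int) :
    get_total_len lst val = get_total_len s val := by
  unfold get_total_len
  exact (List.Perm.sum_eq (List.Perm.map _ h)).symm

-- A's recursion equals B's loop once B's probe computes get_total_len lst mid
theorem loop_eq (lst s : List Int) (hperm : s.Perm lst)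
    (hs : s.Pairwise (fun a b => a ≤ b)) (min_v : Int) :
    ∀ (k : Nat) (left right : Int),
      fmvGo lst min_v k left right
        = altLoopGo s (s.length : Int) (sufSpec s) min_v k left right := by
  intro k
  induction k with
  | zero => intro left right; rfl
  | succ k ih =>
      intro left right
      simp only [fmvGo, altLoopGo]
      by_cases hlr : left < right
      · have h1 : ¬ left ≥ right := by omega
        simp only [h1, if_false, hlr, if_true]
        set mid := PySem.Int.floordiv (left + right) 2 with hmid
        -- B's probe value equals A's probe value
        have hc := cLE_le_length s mid
        have hbis : pyBisectRight s mid = (cLE s mid : Int) := pyBisectRight_eq s mid hs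
        have hsuf : PySem.List.pyGet? (sufSpec s) ((cLE s mid : Nat) : Int)
            = some ((s.drop (cLE s mid)).sum) := by
          rw [PySem.List.pyGet?_natCast, sufSpec_get s _ hc]
        have hprobe : (PySem.List.pyGet? (sufSpec s) (pyBisectRight s mid)).getD 0
            - ((s.length : Int) - pyBisectRight s mid) * mid
            = get_total_len lst mid := by
          rw [hbis, hsuf, Option.getD_some, get_total_len_perm lst s hperm,
            total_closed s mid hs]
        rw [hprobe]
        by_cases he : get_total_len lst mid = min_v
        · simp [he]
        · simp only [he, if_false]
          by_cases hg : get_total_len lst mid > min_v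
          · simp only [hg, if_true]
            exact ih (mid + 1) right
          · simp only [hg, if_false]
            exact ih left (mid - 1)
      · have h1 : left ≥ right := by omega
        simp [h1, hlr]

-- ===== VERDICT (by name: the statement is the Claim_ definition above) =====
theorem find_minimum_value_spec : Claim_equal_find_minimum_value := by
  intro lst min_v left right _
  unfold Spec_find_minimum_value find_minimum_value_alt find_minimum_value
  have hperm : (PySem.List.sorted lst (fun x => x) false).Perm lst :=
    PySem.List.sorted_perm lst (fun x => x) false
  have hs : (PySem.List.sorted lst (fun x => x) false).Pairwise (fun a b => a ≤ b) := by
    simpa using PySem.List.sorted_pairwise lst (fun x => x)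
  simp only [suf_build, List.reverse_reverse]
  exact loop_eq lst _ hperm hs min_v (right - left).toNat left right
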